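-- pv_equiv track=rewrite | github.com/koii-network/prometheus-beta | src/even_odd_calculator.py | calculate_even_sum_odd_product
-- ===== SOURCE A (Python) =====
-- def calculate_even_sum_odd_product(numbers):
--     """
--     Calculate the sum of even numbers and product of odd numbers in the input array.
--
--     Args:
--         numbers (list): A list of integers
--
--     Returns:
--         tuple: A tuple containing (sum of even numbers, product of odd numbers)
--
--     Raises:
--         TypeError: If input is not a list or contains non-integer elements
--     """
--     # Validate input
--     if not isinstance(numbers, list):
--         raise TypeError("Input must be a list")
--
--     # Validate all elements are integers
--     if not all(isinstance(num, int) for num in numbers):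
--         raise TypeError("All elements must be integers")
--
--     # Calculate sum of even numbers
--     even_sum = sum(num for num in numbers if num % 2 == 0)
--
--     # Calculate product of odd numbers
--     # Use 1 as initial value to handle empty list of odd numbers
--     odd_product = 1
--     for num in numbers:
--         if num % 2 != 0:
--             odd_product *= num
--
--     # If no odd numbers were found, return 1 as the product
--     odd_product = odd_product if odd_product != 1 or any(num % 2 != 0 for num in numbers) else 0
--
--     return even_sum, odd_product
-- ===== SOURCE B (Python) =====
-- def calculate_even_sum_odd_product(numbers):
--     if not isinstance(numbers, list):
--         raise TypeError("Input must be a list")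
--     if not all(isinstance(num, int) for num in numbers):
--         raise TypeError("All elements must be integers")
--     even_sum = 0
--     odd_product = 1
--     has_odd = False
--     for n in numbers:
--         if n % 2 == 0:
--             even_sum += n
--         else:
--             odd_product *= n
--             has_odd = True
--     return even_sum, (odd_product if has_odd else 0)
-- ===== Notes on version B (the rewrite author's own statement) =====
-- stated objective: simpler
-- what changed: One single pass maintaining even_sum, odd_product and a has_odd flag replaces A's three separate traversals (sum pass, product pass, trailing any() re-scan).
import Mathlib
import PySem

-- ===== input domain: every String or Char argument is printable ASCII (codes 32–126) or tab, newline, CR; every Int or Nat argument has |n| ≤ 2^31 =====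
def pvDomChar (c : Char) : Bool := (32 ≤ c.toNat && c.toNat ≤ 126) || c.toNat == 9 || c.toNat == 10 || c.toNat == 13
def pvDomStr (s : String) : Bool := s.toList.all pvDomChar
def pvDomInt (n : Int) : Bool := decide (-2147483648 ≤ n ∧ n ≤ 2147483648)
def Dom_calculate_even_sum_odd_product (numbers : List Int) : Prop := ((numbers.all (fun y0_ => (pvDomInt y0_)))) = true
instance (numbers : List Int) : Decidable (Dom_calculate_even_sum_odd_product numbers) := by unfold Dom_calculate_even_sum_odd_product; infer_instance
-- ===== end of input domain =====

-- B fuses A's three traversals into one pass with a has_odd flag; return values proved equal on all inputs.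

-- ===== PORT A =====
def calculate_even_sum_odd_product (numbers : List Int) : Int × Int :=
  -- even_sum = sum(num for num in numbers if num % 2 == 0)
  let even_sum := numbers.foldl (fun s num => if PySem.Int.mod num 2 == 0 then s + num else s) 0
  -- odd_product = 1; for num in numbers: if num % 2 != 0: odd_product *= num
  let odd_product := numbers.foldl (fun p num => if PySem.Int.mod num 2 != 0 then p * num else p) 1
  -- odd_product = odd_product if odd_product != 1 or any(num % 2 != 0 for num in numbers) else 0
  let odd_product := if odd_product != 1 || numbers.any (fun num => PySem.Int.mod num 2 != 0) then odd_product else 0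
  (even_sum, odd_product)

-- ===== PORT B =====
def calculate_even_sum_odd_product_alt (numbers : List Int) : Int × Int :=
  let st := numbers.foldl
    (fun (st : Int × Int × Bool) n =>
      if PySem.Int.mod n 2 == 0 then (st.1 + n, st.2.1, st.2.2)
      else (st.1, st.2.1 * n, true))
    (0, 1, false)
  (st.1, if st.2.2 then st.2.1 else 0)

-- ===== PRECONDITION & SPEC =====
def Spec_calculate_even_sum_odd_product (numbers : List Int) (out : Int × Int) : Prop := out = calculate_even_sum_odd_product_alt numbers
instance (numbers : List Int) (out : Int × Int) : Decidable (Spec_calculate_even_sum_odd_product numbers out) := by unfold Spec_calculate_even_sum_odd_product; infer_instance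

-- ===== CLAIM (what is proved, stated in full; the proofs are below) =====
def Claim_equal_calculate_even_sum_odd_product : Prop := ∀ (numbers : List Int), Dom_calculate_even_sum_odd_product numbers → Spec_calculate_even_sum_odd_product numbers (calculate_even_sum_odd_product numbers)

-- ===== LEMMAS AND PROOFS =====

lemma pv_sum_shift (xs : List Int) (s : Int) :
    xs.foldl (fun s num => if PySem.Int.mod num 2 == 0 then s + num else s) s
      = s + xs.foldl (fun s num => if PySem.Int.mod num 2 == 0 then s + num else s) 0 := by
  induction xs generalizing s with
  | nil => simp
  | cons x xs ih =>
    simp only [List.foldl_cons]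
    by_cases h : (PySem.Int.mod x 2 == 0) = true
    · rw [if_pos h, if_pos h, ih (s + x), ih (0 + x)]; ring
    · rw [if_neg h, if_neg h]; exact ih s

lemma pv_prod_shift (xs : List Int) (p : Int) :
    xs.foldl (fun p num => if PySem.Int.mod num 2 != 0 then p * num else p) p
      = p * xs.foldl (fun p num => if PySem.Int.mod num 2 != 0 then p * num else p) 1 := by
  induction xs generalizing p with
  | nil => simp
  | cons x xs ih =>
    simp only [List.foldl_cons]
    by_cases h : (PySem.Int.mod x 2 != 0) = true
    · rw [if_pos h, if_pos h, ih (p * x), ih (1 * x)]; ring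
    · rw [if_neg h, if_neg h]; exact ih p

lemma pv_alt_fold (xs : List Int) (s p : Int) (b : Bool) :
    xs.foldl
      (fun (st : Int × Int × Bool) n =>
        if PySem.Int.mod n 2 == 0 then (st.1 + n, st.2.1, st.2.2)
        else (st.1, st.2.1 * n, true))
      (s, p, b)
      = (s + xs.foldl (fun s num => if PySem.Int.mod num 2 == 0 then s + num else s) 0,
         p * xs.foldl (fun p num => if PySem.Int.mod num 2 != 0 then p * num else p) 1,
         b || xs.any (fun num => PySem.Int.mod num 2 != 0)) := by
  induction xs generalizing s p b with
  | nil => simp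
  | cons x xs ih =>
    simp only [List.foldl_cons, List.any_cons]
    by_cases h : (PySem.Int.mod x 2 == 0) = true
    · have h' : (PySem.Int.mod x 2 != 0) = false := by simp [bne]; simpa using h
      have hne : ¬((PySem.Int.mod x 2 != 0) = true) := by rw [h']; exact Bool.false_ne_true
      rw [if_pos h, if_pos h, if_neg hne, h', Bool.false_or,
          ih (s + x) p b, pv_sum_shift xs (0 + x), zero_add, add_assoc]
    · have h' : (PySem.Int.mod x 2 != 0) = true := by simpa [bne] using h
      rw [if_neg h, if_neg h, if_pos h', h', Bool.true_or, Bool.or_true,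
          ih s (p * x) true, pv_prod_shift xs (1 * x), one_mul, mul_assoc, Bool.true_or]

-- if no odd number occurs, the odd product stays 1
lemma pv_no_odd_prod_one (xs : List Int)
    (h : xs.any (fun num => PySem.Int.mod num 2 != 0) = false) :
    xs.foldl (fun p num => if PySem.Int.mod num 2 != 0 then p * num else p) 1 = 1 := by
  induction xs with
  | nil => rfl
  | cons x xs ih =>
    simp only [List.any_cons, Bool.or_eq_false_iff] at h
    simp only [List.foldl_cons, h.1, if_neg, Bool.false_eq_true, not_false_iff, ite_false]
    exact ih h.2

-- ===== VERDICT (by name: the statement is the Claim_ definition above) =====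
theorem calculate_even_sum_odd_product_spec : Claim_equal_calculate_even_sum_odd_product := by
  intro numbers _
  unfold Spec_calculate_even_sum_odd_product calculate_even_sum_odd_product calculate_even_sum_odd_product_alt
  rw [pv_alt_fold]
  simp only
  cases hany : numbers.any (fun num => PySem.Int.mod num 2 != 0) with
  | true => simp
  | false =>
    rw [pv_no_odd_prod_one numbers hany]
    simp
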